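-- pv_equiv track=rewrite | github.com/Vivien2503/INF1002-GroupB4 | Max Profit Calculation.py | extract_trades
-- ===== SOURCE A (Python) =====
-- def extract_trades(prices):
--     trades, i, n = [], 0, len(prices)
--     while i < n - 1:
--         while i < n - 1 and prices[i + 1] <= prices[i]: i += 1
--         buy = i
--         while i < n - 1 and prices[i + 1] >= prices[i]: i += 1
--         sell = i
--         if sell > buy: trades.append((buy, sell))
--         i += 1
--     return trades
-- ===== SOURCE B (Python) =====
-- def extract_trades(prices):
--     trades = []
--     holding = False
--     buy = 0
--     for i in range(len(prices) - 1):
--         if not holding and prices[i + 1] > prices[i]: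
--             buy = i
--             holding = True
--         elif holding and prices[i + 1] < prices[i]:
--             trades.append((buy, i))
--             holding = False
--     if holding:
--         trades.append((buy, len(prices) - 1))
--     return trades
-- ===== Notes on version B (the rewrite author's own statement) =====
-- stated objective: simpler
-- what changed: Replaced the outer-while with two nested skip-while loops by a single flat pass over adjacent pairs maintaining a boolean 'holding' state, with one post-loop append for an open position.
import Mathlib
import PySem

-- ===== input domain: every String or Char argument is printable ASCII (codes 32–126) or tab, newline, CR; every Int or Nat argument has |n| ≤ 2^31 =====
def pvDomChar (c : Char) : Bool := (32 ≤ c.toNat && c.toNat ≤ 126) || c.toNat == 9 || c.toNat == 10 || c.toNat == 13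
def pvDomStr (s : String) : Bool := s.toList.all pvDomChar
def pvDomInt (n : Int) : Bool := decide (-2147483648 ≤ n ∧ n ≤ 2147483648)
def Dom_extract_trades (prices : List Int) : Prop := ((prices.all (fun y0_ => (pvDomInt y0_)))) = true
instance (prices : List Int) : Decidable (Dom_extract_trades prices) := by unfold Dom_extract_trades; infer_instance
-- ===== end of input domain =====

-- B replaces A's nested skip-while loops by a single flat pass with a boolean holding state (simpler decomposition, same O(n) cost).


-- ===== PORT A =====
-- A's loops terminate because the index i strictly increases towards n-1; they are transcribed with a
-- structural fuel argument that starts at n, which is proved sufficient (the fuel-0 arm is never reached: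
-- see skipDown_stop / skipUp_stop and the n-1 ≤ fuel+i invariant in aLoop_eq_bLoop below).
-- Index accesses prices[i], prices[i+1] occur only with i+1 ≤ n-1, always in range, so List.getD _ 0 is exact.

-- while i < n - 1 and prices[i + 1] <= prices[i]: i += 1
def skipDown (p : List Int) (n : Nat) : Nat → Nat → Nat
  | 0, i => i
  | fuel + 1, i =>
      if i < n - 1 ∧ p.getD (i + 1) 0 ≤ p.getD i 0 then skipDown p n fuel (i + 1) else i

-- while i < n - 1 and prices[i + 1] >= prices[i]: i += 1
def skipUp (p : List Int) (n : Nat) : Nat → Nat → Nat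
  | 0, i => i
  | fuel + 1, i =>
      if i < n - 1 ∧ p.getD (i + 1) 0 ≥ p.getD i 0 then skipUp p n fuel (i + 1) else i

-- the outer while loop of A
def aLoop (p : List Int) (n : Nat) : Nat → Nat → List (Int × Int) → List (Int × Int)
  | 0, _, trades => trades
  | fuel + 1, i, trades =>
      if i < n - 1 then
        let buy := skipDown p n n i
        let sell := skipUp p n n buy
        aLoop p n fuel (sell + 1)
          (if sell > buy then trades ++ [((buy : Int), (sell : Int))] else trades)
      else trades

def extract_trades (prices : List Int) : List (Int × Int) :=
  aLoop prices prices.length prices.length 0 []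

-- ===== PORT B =====
-- B's single 'for i in range(n - 1)' pass with state (trades, holding, buy); same sufficient fuel n.
def bLoop (p : List Int) (n : Nat) : Nat → Nat → List (Int × Int) → Bool → Nat → List (Int × Int)
  | 0, _, trades, holding, buy =>
      if holding = true then trades ++ [((buy : Int), (n : Int) - 1)] else trades
  | fuel + 1, i, trades, holding, buy =>
      if i < n - 1 then
        if holding = false ∧ p.getD (i + 1) 0 > p.getD i 0 then
          bLoop p n fuel (i + 1) trades true i
        else if holding = true ∧ p.getD (i + 1) 0 < p.getD i 0 then
          bLoop p n fuel (i + 1) (trades ++ [((buy : Int), (i : Int))]) false buy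
        else
          bLoop p n fuel (i + 1) trades holding buy
      else
        if holding = true then trades ++ [((buy : Int), (n : Int) - 1)] else trades

def extract_trades_alt (prices : List Int) : List (Int × Int) :=
  bLoop prices prices.length prices.length 0 [] false 0

-- ===== PRECONDITION & SPEC =====
def Spec_extract_trades (prices : List Int) (out : List (Int × Int)) : Prop := out = extract_trades_alt prices
instance (prices : List Int) (out : List (Int × Int)) : Decidable (Spec_extract_trades prices out) := by unfold Spec_extract_trades; infer_instance

-- ===== CLAIM (what is proved, stated in full; the proofs are below) =====
def Claim_equal_extract_trades : Prop := ∀ (prices : List Int), Dom_extract_trades prices → Spec_extract_trades prices (extract_trades prices)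

-- ===== LEMMAS AND PROOFS =====

theorem skipDown_ge (p : List Int) (n : Nat) :
    ∀ f i, i ≤ skipDown p n f i := by
  intro f
  induction f with
  | zero => intro i; simp [skipDown]
  | succ f ih =>
      intro i
      simp only [skipDown]
      split
      · exact le_trans (by omega) (ih (i + 1))
      · exact le_refl i

theorem skipUp_ge (p : List Int) (n : Nat) :
    ∀ f i, i ≤ skipUp p n f i := by
  intro f
  induction f with
  | zero => intro i; simp [skipUp]
  | succ f ih =>
      intro i
      simp only [skipUp]
      split
      · exact le_trans (by omega) (ih (i + 1))
      · exact le_refl i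

theorem skipUp_le (p : List Int) (n : Nat) :
    ∀ f i, i ≤ n - 1 → skipUp p n f i ≤ n - 1 := by
  intro f
  induction f with
  | zero => intro i hi; simpa [skipUp] using hi
  | succ f ih =>
      intro i hi
      simp only [skipUp]
      split
      · next h => exact ih (i + 1) (by omega)
      · exact hi

theorem skipDown_stop (p : List Int) (n : Nat) :
    ∀ f i, n - 1 ≤ f + i →
      ¬ (skipDown p n f i < n - 1 ∧ p.getD (skipDown p n f i + 1) 0 ≤ p.getD (skipDown p n f i) 0) := by
  intro f
  induction f with
  | zero => intro i hf; simp only [skipDown]; omega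
  | succ f ih =>
      intro i hf
      simp only [skipDown]
      split
      · next h => exact ih (i + 1) (by omega)
      · next h => exact h

theorem skipUp_stop (p : List Int) (n : Nat) :
    ∀ f i, n - 1 ≤ f + i →
      ¬ (skipUp p n f i < n - 1 ∧ p.getD (skipUp p n f i + 1) 0 ≥ p.getD (skipUp p n f i) 0) := by
  intro f
  induction f with
  | zero => intro i hf; simp only [skipUp]; omega
  | succ f ih =>
      intro i hf
      simp only [skipUp]
      split
      · next h => exact ih (i + 1) (by omega)
      · next h => exact h

-- once i has reached n-1, any remaining fuel leaves the index where it is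
theorem skipUp_stuck (p : List Int) (n : Nat) (f i : Nat) (hi : ¬ i < n - 1) :
    skipUp p n f i = i := by
  cases f with
  | zero => rfl
  | succ f => simp only [skipUp]; rw [if_neg (by omega)]

-- with sufficient fuel the result does not depend on the fuel
theorem skipDown_fuel_congr (p : List Int) (n : Nat) :
    ∀ f g i, n - 1 ≤ f + i → n - 1 ≤ g + i → skipDown p n f i = skipDown p n g i := by
  intro f
  induction f with
  | zero =>
      intro g i hf hg
      cases g with
      | zero => rfl
      | succ g => simp only [skipDown]; rw [if_neg (by omega)]
  | succ f ih =>
      intro g i hf hg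
      cases g with
      | zero => simp only [skipDown]; rw [if_neg (by omega)]
      | succ g =>
          simp only [skipDown]
          split
          · next h => exact ih g (i + 1) (by omega) (by omega)
          · rfl

theorem skipUp_fuel_congr (p : List Int) (n : Nat) :
    ∀ f g i, n - 1 ≤ f + i → n - 1 ≤ g + i → skipUp p n f i = skipUp p n g i := by
  intro f
  induction f with
  | zero =>
      intro g i hf hg
      cases g with
      | zero => rfl
      | succ g => simp only [skipUp]; rw [if_neg (by omega)]
  | succ f ih =>
      intro g i hf hg
      cases g with
      | zero => simp only [skipUp]; rw [if_neg (by omega)]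
      | succ g =>
          simp only [skipUp]
          split
          · next h => exact ih g (i + 1) (by omega) (by omega)
          · rfl

-- loop already finished: any fuel gives the post-loop value
theorem aLoop_done (p : List Int) (n : Nat) (f i : Nat) (tr : List (Int × Int))
    (hi : ¬ i < n - 1) : aLoop p n f i tr = tr := by
  cases f with
  | zero => rfl
  | succ f => simp only [aLoop]; rw [if_neg hi]

theorem bLoop_done (p : List Int) (n : Nat) (f i : Nat) (tr : List (Int × Int))
    (h : Bool) (b : Nat) (hi : ¬ i < n - 1) :
    bLoop p n f i tr h b = if h = true then tr ++ [((b : Int), (n : Int) - 1)] else tr := by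
  cases f with
  | zero => rfl
  | succ f => simp only [bLoop]; rw [if_neg hi]

theorem bLoop_fuel_congr (p : List Int) (n : Nat) :
    ∀ f g i tr h b, n - 1 ≤ f + i → n - 1 ≤ g + i →
      bLoop p n f i tr h b = bLoop p n g i tr h b := by
  intro f
  induction f with
  | zero =>
      intro g i tr h b hf hg
      rw [bLoop_done p n g i tr h b (by omega)]
      rfl
  | succ f ih =>
      intro g i tr h b hf hg
      by_cases hi : i < n - 1
      · cases g with
        | zero => omega
        | succ g =>
            simp only [bLoop]
            rw [if_pos hi, if_pos hi]
            split
            · exact ih g (i + 1) tr true i (by omega) (by omega)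
            · split
              · exact ih g (i + 1) (tr ++ [((b : Int), (i : Int))]) false b (by omega) (by omega)
              · exact ih g (i + 1) tr h b (by omega) (by omega)
      · rw [bLoop_done p n (f + 1) i tr h b hi, bLoop_done p n g i tr h b hi]

-- while not holding, B leaves its state unchanged across A's downhill skip
theorem bLoop_skipDown (p : List Int) (n : Nat) :
    ∀ f i tr b, n - 1 ≤ f + i →
      bLoop p n f i tr false b = bLoop p n f (skipDown p n f i) tr false b := by
  intro f
  induction f with
  | zero => intro i tr b hf; rfl
  | succ f ih =>
      intro i tr b hf
      simp only [skipDown]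
      split
      · next h =>
          have step : bLoop p n (f + 1) i tr false b = bLoop p n f (i + 1) tr false b := by
            simp only [bLoop]
            rw [if_pos h.1, if_neg (by rintro ⟨_, hgt⟩; omega),
                if_neg (by simp)]
          rw [step, ih (i + 1) tr b (by omega)]
          exact bLoop_fuel_congr p n f (f + 1) (skipDown p n f (i + 1)) tr false b
            (by have := skipDown_ge p n f (i + 1); omega)
            (by have := skipDown_ge p n f (i + 1); omega)
      · rfl

-- while holding, B leaves its state unchanged across A's uphill skip
theorem bLoop_skipUp (p : List Int) (n : Nat) :
    ∀ f i tr b, n - 1 ≤ f + i →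
      bLoop p n f i tr true b = bLoop p n f (skipUp p n f i) tr true b := by
  intro f
  induction f with
  | zero => intro i tr b hf; rfl
  | succ f ih =>
      intro i tr b hf
      simp only [skipUp]
      split
      · next h =>
          have step : bLoop p n (f + 1) i tr true b = bLoop p n f (i + 1) tr true b := by
            simp only [bLoop]
            rw [if_pos h.1, if_neg (by simp),
                if_neg (by rintro ⟨_, hlt⟩; omega)]
          rw [step, ih (i + 1) tr b (by omega)]
          exact bLoop_fuel_congr p n f (f + 1) (skipUp p n f (i + 1)) tr true b
            (by have := skipUp_ge p n f (i + 1); omega)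
            (by have := skipUp_ge p n f (i + 1); omega)
      · rfl

theorem aLoop_eq_bLoop (p : List Int) (n : Nat) (hn : n = p.length) :
    ∀ f i tr b, n - 1 ≤ f + i →
      aLoop p n f i tr = bLoop p n f i tr false b := by
  intro f
  induction f with
  | zero =>
      intro i tr b hf
      rw [bLoop_done p n 0 i tr false b (by omega)]
      simp [aLoop]
  | succ f ih =>
      intro i tr b hf
      by_cases hi : i < n - 1
      · have hstep : aLoop p n (f + 1) i tr =
            aLoop p n f (skipUp p n n (skipDown p n n i) + 1)
              (if skipUp p n n (skipDown p n n i) > skipDown p n n i then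
                  tr ++ [((skipDown p n n i : Int), (skipUp p n n (skipDown p n n i) : Int))]
                else tr) := by
          simp only [aLoop]
          rw [if_pos hi]
        rw [hstep]
        rw [bLoop_skipDown p n (f + 1) i tr b (by omega)]
        rw [skipDown_fuel_congr p n (f + 1) n i (by omega) (by omega)]
        have hj : i ≤ skipDown p n n i := skipDown_ge p n n i
        have hstopd := skipDown_stop p n n i (by omega)
        generalize hjdef : skipDown p n n i = j at *
        by_cases hjlt : j < n - 1
        · have hrise : p.getD (j + 1) 0 > p.getD j 0 := by
            rcases lt_or_ge (p.getD j 0) (p.getD (j + 1) 0) with h | h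
            · exact h
            · exact absurd ⟨hjlt, h⟩ hstopd
          have hb1 : bLoop p n (f + 1) j tr false b = bLoop p n f (j + 1) tr true j := by
            simp only [bLoop]
            rw [if_pos hjlt, if_pos ⟨by trivial, hrise⟩]
          rw [hb1, bLoop_skipUp p n f (j + 1) tr j (by omega)]
          have hs' : skipUp p n f (j + 1) = skipUp p n n j := by
            have e : n = (n - 1) + 1 := by omega
            have h1 : skipUp p n n j = skipUp p n ((n - 1) + 1) j :=
              congrArg (fun t => skipUp p n t j) e
            have h2 : skipUp p n ((n - 1) + 1) j = skipUp p n (n - 1) (j + 1) := by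
              simp only [skipUp]
              rw [if_pos ⟨hjlt, le_of_lt hrise⟩]
            rw [h1, h2]
            exact skipUp_fuel_congr p n f (n - 1) (j + 1) (by omega) (by omega)
          rw [hs']
          have hs1 : j + 1 ≤ skipUp p n n j := by
            have := skipUp_ge p n f (j + 1)
            omega
          have hstopu := skipUp_stop p n n j (by omega)
          have hsle : skipUp p n n j ≤ n - 1 := skipUp_le p n n j (by omega)
          generalize hsdef : skipUp p n n j = s at *
          by_cases hslt : s < n - 1
          · have hdrop : p.getD (s + 1) 0 < p.getD s 0 := by
              rcases lt_or_ge (p.getD (s + 1) 0) (p.getD s 0) with h | h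
              · exact h
              · exact absurd ⟨hslt, h⟩ hstopu
            have hf1 : ∃ f', f = f' + 1 := ⟨f - 1, by omega⟩
            obtain ⟨f', rfl⟩ := hf1
            have hb2 : bLoop p n (f' + 1) s tr true j =
                bLoop p n f' (s + 1) (tr ++ [((j : Int), (s : Int))]) false j := by
              simp only [bLoop]
              rw [if_pos hslt, if_neg (by simp), if_pos ⟨by trivial, hdrop⟩]
            rw [hb2, if_pos (show s > j by omega)]
            rw [ih (s + 1) (tr ++ [((j : Int), (s : Int))]) j (by omega)]
            exact bLoop_fuel_congr p n (f' + 1) f' (s + 1) (tr ++ [((j : Int), (s : Int))])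
              false j (by omega) (by omega)
          · rw [bLoop_done p n f s tr true j hslt, if_pos rfl]
            rw [if_pos (show s > j by omega)]
            rw [aLoop_done p n f (s + 1) _ (by omega)]
            have hcast : ((s : Nat) : Int) = (n : Int) - 1 := by omega
            rw [hcast]
        · have hsj : skipUp p n n j = j := skipUp_stuck p n n j hjlt
          rw [hsj, if_neg (by omega)]
          rw [aLoop_done p n f (j + 1) tr (by omega)]
          rw [bLoop_done p n (f + 1) j tr false b hjlt]
          rfl
      · rw [aLoop_done p n (f + 1) i tr hi, bLoop_done p n (f + 1) i tr false b hi]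
        rfl

-- ===== VERDICT (by name: the statement is the Claim_ definition above) =====
theorem extract_trades_spec : Claim_equal_extract_trades := by
  intro prices _
  unfold Spec_extract_trades extract_trades extract_trades_alt
  exact aLoop_eq_bLoop prices prices.length rfl prices.length 0 [] 0 (by omega)
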